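-- pv_equiv track=rewrite | github.com/dazmagar/labs1_python | tasks/traverse_matrix/column_traverse_1.py | column_traverse
-- ===== SOURCE A (Python) =====
-- import typing as t
--
-- def column_traverse(matrix: t.List[t.List[int]]) -> t.List[int]:
--     rows, cols = len(matrix), len(matrix[0])
--     direction = "up"
--     row, col = rows - 1, cols - 1
--     output = []
--
--     while len(output) < rows * cols:
--         output.append(matrix[row][col])
--
--         if direction == "up":
--             if row - 1 < 0:
--                 direction = "down"
--                 col -= 1
--             else:
--                 row -= 1
--         else:
--             if row + 1 == rows:
--                 direction = "up"
--                 col -= 1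
--             else:
--                 row += 1
--
--     return output
-- ===== SOURCE B (Python) =====
-- import typing as t
--
-- def column_traverse(matrix: t.List[t.List[int]]) -> t.List[int]:
--     rows, cols = len(matrix), len(matrix[0])
--     output = []
--     up = True
--     for col in range(cols - 1, -1, -1):
--         column = [matrix[r][col] for r in range(rows)]
--         output.extend(reversed(column) if up else column)
--         up = not up
--     return output
-- ===== Notes on version B (the rewrite author's own statement) =====
-- stated objective: simpler
-- what changed: Replaces the per-cell while loop with its direction/row/col state machine and boundary tests by a per-column loop that builds each whole column once and appends it reversed or not according to an alternating flag.
import Mathlib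
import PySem

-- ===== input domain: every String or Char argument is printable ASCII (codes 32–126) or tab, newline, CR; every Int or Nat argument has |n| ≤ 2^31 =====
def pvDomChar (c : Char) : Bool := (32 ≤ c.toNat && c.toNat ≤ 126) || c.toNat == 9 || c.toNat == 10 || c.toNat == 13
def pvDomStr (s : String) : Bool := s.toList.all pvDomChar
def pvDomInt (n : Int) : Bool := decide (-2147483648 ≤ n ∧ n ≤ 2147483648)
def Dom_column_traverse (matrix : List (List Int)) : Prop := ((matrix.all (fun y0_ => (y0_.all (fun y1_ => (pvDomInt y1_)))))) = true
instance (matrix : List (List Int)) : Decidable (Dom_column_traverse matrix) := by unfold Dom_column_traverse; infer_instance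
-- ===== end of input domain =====

-- B replaces A's per-cell direction state machine by a per-column loop (build the column, append it reversed or not, flip a flag): simpler control flow, same values.


-- matrix[r][c] on an in-range cell (Pre_ guarantees in-range; default 0 otherwise)
def pvCell (m : List (List Int)) (r c : Int) : Int :=
  PySem.List.pyGetD (PySem.List.pyGetD m r []) c 0

-- ===== PORT A =====
-- the while loop: each iteration appends exactly one element, so it runs rows*cols times (the fuel)
def pvLoopA (m : List (List Int)) (rows : Int) : Nat → String → Int → Int → List Int → List Int
  | 0, _, _, _, output => output
  | Nat.succ n, direction, row, col, output =>
    let output := output ++ [pvCell m row col]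
    if direction = "up" then
      if row - 1 < 0 then pvLoopA m rows n "down" row (col - 1) output
      else pvLoopA m rows n "up" (row - 1) col output
    else
      if row + 1 = rows then pvLoopA m rows n "up" row (col - 1) output
      else pvLoopA m rows n "down" (row + 1) col output

def column_traverse (matrix : List (List Int)) : List Int :=
  let rows : Int := matrix.length
  let cols : Int := (PySem.List.pyGetD matrix 0 []).length
  pvLoopA matrix rows (rows * cols).toNat "up" (rows - 1) (cols - 1) []

-- ===== PORT B =====
def column_traverse_alt (matrix : List (List Int)) : List Int :=
  let rows : Int := matrix.length
  let cols : Int := (PySem.List.pyGetD matrix 0 []).length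
  ((PySem.List.pyRange (cols - 1) (-1) (-1)).foldl
    (fun (st : List Int × Bool) col =>
      let column := (PySem.List.pyRange 0 rows 1).map (fun r => pvCell matrix r col)
      (st.1 ++ (if st.2 then column.reverse else column), !st.2))
    ([], true)).1

-- ===== PRECONDITION & SPEC =====
-- Pre_ excludes exactly the inputs where Python A raises IndexError: the empty matrix
-- (matrix[0]) and ragged matrices with a row shorter than row 0 (matrix[r][col]).
def Pre_column_traverse (matrix : List (List Int)) : Prop :=
  matrix ≠ [] ∧ ∀ row ∈ matrix, (matrix.headD []).length ≤ row.length
instance (matrix : List (List Int)) : Decidable (Pre_column_traverse matrix) := by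
  unfold Pre_column_traverse; infer_instance
def pvWitness_column_traverse : List (List Int) := [[1, 2], [3, 4], [5, 6]]

def Spec_column_traverse (matrix : List (List Int)) (out : List Int) : Prop := out = column_traverse_alt matrix
instance (matrix : List (List Int)) (out : List Int) : Decidable (Spec_column_traverse matrix out) := by unfold Spec_column_traverse; infer_instance

-- ===== CLAIM (what is proved, stated in full; the proofs are below) =====
def Claim_equal_column_traverse : Prop := ∀ (matrix : List (List Int)), Dom_column_traverse matrix → Pre_column_traverse matrix → Spec_column_traverse matrix (column_traverse matrix)

-- ===== LEMMAS AND PROOFS =====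

-- one unfolding step of A's while loop
theorem pvLoopA_succ (m : List (List Int)) (rows : Int) (n : Nat) (dir : String)
    (row col : Int) (out : List Int) :
    pvLoopA m rows (n + 1) dir row col out =
      (if dir = "up" then
        (if row - 1 < 0 then pvLoopA m rows n "down" row (col - 1) (out ++ [pvCell m row col])
         else pvLoopA m rows n "up" (row - 1) col (out ++ [pvCell m row col]))
       else
        (if row + 1 = rows then pvLoopA m rows n "up" row (col - 1) (out ++ [pvCell m row col])
         else pvLoopA m rows n "down" (row + 1) col (out ++ [pvCell m row col]))) := rfl

-- one column, as B reads it (top to bottom)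
def pvCol (m : List (List Int)) (rowsN : Nat) (c : Int) : List Int :=
  (List.range rowsN).map (fun (r : Nat) => pvCell m (r : Int) c)

-- what both sides produce for the remaining columns c-1, c-2, ..., 0
def pvSpec (m : List (List Int)) (rowsN : Nat) : Nat → Bool → List Int
  | 0, _ => []
  | Nat.succ c, up =>
      (if up then (pvCol m rowsN (c : Int)).reverse else pvCol m rowsN (c : Int)) ++
        pvSpec m rowsN c (!up)

-- A's upward pass through one column: from row r down to row 0, then switch
theorem pvLoopA_up (m : List (List Int)) (rowsN : Nat) (r n : Nat) (col : Int)
    (out : List Int) :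
    pvLoopA m (rowsN : Int) (n + (r + 1)) "up" (r : Int) col out =
      pvLoopA m (rowsN : Int) n "down" 0 (col - 1)
        (out ++ ((List.range (r + 1)).reverse.map (fun (i : Nat) => pvCell m (i : Int) col))) := by
  induction r generalizing out with
  | zero =>
      show pvLoopA m (rowsN : Int) (n + 1) "up" (((0 : Nat)) : Int) col out = _
      rw [pvLoopA_succ, if_pos rfl, if_pos (show (((0 : Nat)) : Int) - 1 < 0 by omega)]
      simp [List.range_succ]
  | succ r ih =>
      show pvLoopA m (rowsN : Int) ((n + (r + 1)) + 1) "up" (((r + 1 : Nat)) : Int) col out = _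
      rw [pvLoopA_succ, if_pos rfl,
        if_neg (show ¬ ((((r + 1 : Nat)) : Int) - 1 < 0) by omega),
        show (((r + 1 : Nat)) : Int) - 1 = ((r : Nat) : Int) by omega, ih]
      congr 1
      simp [List.range_succ]

-- A's downward pass through one column: from row rowsN-1-k up to row rowsN-1, then switch
theorem pvLoopA_down (m : List (List Int)) (rowsN : Nat) (k n : Nat) (hk : k < rowsN)
    (col : Int) (out : List Int) :
    pvLoopA m (rowsN : Int) (n + (k + 1)) "down" ((rowsN : Int) - 1 - (k : Int)) col out =
      pvLoopA m (rowsN : Int) n "up" ((rowsN : Int) - 1) (col - 1)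
        (out ++ ((List.range (k + 1)).map (fun (i : Nat) => pvCell m ((rowsN - 1 - k + i : Nat) : Int) col))) := by
  induction k generalizing out with
  | zero =>
      show pvLoopA m (rowsN : Int) (n + 1) "down" ((rowsN : Int) - 1 - (((0 : Nat)) : Int)) col out = _
      rw [pvLoopA_succ, if_neg (by decide : ¬ ("down" = "up")),
        if_pos (show (rowsN : Int) - 1 - (((0 : Nat)) : Int) + 1 = (rowsN : Int) by omega)]
      simp only [List.range_succ, List.range_zero, List.nil_append, List.map_cons, List.map_nil,
        Nat.cast_zero, sub_zero, Nat.sub_zero, Nat.add_zero]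
      rw [show ((rowsN - 1 : Nat) : Int) = (rowsN : Int) - 1 by omega]
  | succ k ih =>
      show pvLoopA m (rowsN : Int) ((n + (k + 1)) + 1) "down" ((rowsN : Int) - 1 - (((k + 1 : Nat)) : Int)) col out = _
      rw [pvLoopA_succ, if_neg (by decide : ¬ ("down" = "up")),
        if_neg (show ¬ ((rowsN : Int) - 1 - (((k + 1 : Nat)) : Int) + 1 = (rowsN : Int)) by omega),
        show (rowsN : Int) - 1 - (((k + 1 : Nat)) : Int) + 1 = (rowsN : Int) - 1 - ((k : Nat) : Int) by omega,
        ih (by omega)]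
      congr 1
      rw [List.append_assoc]
      congr 1
      conv_rhs => rw [List.range_succ_eq_map]
      simp only [List.map_cons, List.map_map, List.singleton_append]
      congr 1
      · congr 1
        omega
      · apply List.map_congr_left
        intro i hi
        simp only [Function.comp]
        congr 1
        omega

-- A's loop over the remaining c columns equals pvSpec (both starting phases)
theorem pvLoopA_cols (m : List (List Int)) (rowsN : Nat) (hrows : 0 < rowsN) (c : Nat) :
    (∀ out : List Int,
        pvLoopA m (rowsN : Int) (rowsN * c) "up" ((rowsN : Int) - 1) ((c : Int) - 1) out =
          out ++ pvSpec m rowsN c true) ∧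
    (∀ out : List Int,
        pvLoopA m (rowsN : Int) (rowsN * c) "down" 0 ((c : Int) - 1) out =
          out ++ pvSpec m rowsN c false) := by
  induction c with
  | zero => constructor <;> intro out <;> simp [pvLoopA, pvSpec]
  | succ c ih =>
      have hcol : (((c + 1 : Nat)) : Int) - 1 = ((c : Nat) : Int) := by push_cast; ring
      have hrev : (List.range ((rowsN - 1) + 1)).reverse.map (fun (i : Nat) => pvCell m (i : Int) ((c : Nat) : Int)) =
          (pvCol m rowsN ((c : Nat) : Int)).reverse := by
        rw [show (rowsN - 1) + 1 = rowsN by omega, List.map_reverse]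
        rfl
      have hfwd : (List.range ((rowsN - 1) + 1)).map
            (fun (i : Nat) => pvCell m ((rowsN - 1 - (rowsN - 1) + i : Nat) : Int) ((c : Nat) : Int)) =
          pvCol m rowsN ((c : Nat) : Int) := by
        rw [show (rowsN - 1) + 1 = rowsN by omega]
        unfold pvCol
        apply List.map_congr_left
        intro i _
        congr 1
        omega
      constructor <;> intro out
      · rw [hcol, show ((rowsN : Int) - 1) = (((rowsN - 1 : Nat)) : Int) by omega,
          show rowsN * (c + 1) = rowsN * c + ((rowsN - 1) + 1) by rw [Nat.mul_succ]; omega,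
          pvLoopA_up, ih.2, List.append_assoc]
        congr 1
        rw [show pvSpec m rowsN (c + 1) true = (pvCol m rowsN ((c : Nat) : Int)).reverse ++ pvSpec m rowsN c false by simp [pvSpec]]
        rw [hrev]
      · rw [hcol, show rowsN * (c + 1) = rowsN * c + ((rowsN - 1) + 1) by rw [Nat.mul_succ]; omega]
        conv_lhs => rw [show (0 : Int) = (rowsN : Int) - 1 - (((rowsN - 1 : Nat)) : Int) from by omega]
        rw [pvLoopA_down m rowsN (rowsN - 1) (rowsN * c) (by omega), ih.1, List.append_assoc]
        congr 1
        rw [show pvSpec m rowsN (c + 1) false = pvCol m rowsN ((c : Nat) : Int) ++ pvSpec m rowsN c true by simp [pvSpec]]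
        rw [hfwd]

-- B's fold over the countdown range equals pvSpec
theorem pvFoldB (m : List (List Int)) (rowsN : Nat) (c : Nat) (up : Bool) (out : List Int) :
    ((PySem.List.pyRange ((c : Int) - 1) (-1) (-1)).foldl
      (fun (st : List Int × Bool) col =>
        (st.1 ++ (if st.2 then ((PySem.List.pyRange 0 (rowsN : Int) 1).map (fun r => pvCell m r col)).reverse
                  else (PySem.List.pyRange 0 (rowsN : Int) 1).map (fun r => pvCell m r col)), !st.2))
      (out, up)).1 = out ++ pvSpec m rowsN c up := by
  induction c generalizing up out with
  | zero =>
      rw [PySem.List.pyRange_neg_one_eq_nil (by omega)]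
      simp [pvSpec]
  | succ c ih =>
      rw [show (((c + 1 : Nat)) : Int) - 1 = ((c : Nat) : Int) by push_cast; ring,
        PySem.List.pyRange_neg_one_cons (by omega : (-1 : Int) < ((c : Nat) : Int)),
        List.foldl_cons]
      simp only
      rw [ih, List.append_assoc]
      congr 1
      have hcolm : (PySem.List.pyRange 0 (rowsN : Int) 1).map (fun r => pvCell m r ((c : Nat) : Int)) =
          pvCol m rowsN ((c : Nat) : Int) := by
        rw [PySem.List.pyRange_one, show ((rowsN : Int) - 0).toNat = rowsN by omega]
        unfold pvCol
        rw [List.map_map]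
        apply List.map_congr_left
        intro i _
        simp only [Function.comp]
        congr 1
        omega
      cases up <;> simp [pvSpec, hcolm]

-- ===== VERDICT (by name: the statement is the Claim_ definition above) =====
theorem column_traverse_spec : Claim_equal_column_traverse := by
  intro matrix _ _
  unfold Spec_column_traverse column_traverse column_traverse_alt
  simp only
  rcases Nat.eq_zero_or_pos matrix.length with h0 | hpos
  · rcases List.eq_nil_of_length_eq_zero h0 with rfl
    simp [pvLoopA, PySem.List.pyGetD, PySem.List.pyRange_neg_one_eq_nil]
  · have hfuel : ((matrix.length : Int) * (((PySem.List.pyGetD matrix 0 []).length : Nat) : Int)).toNat =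
        matrix.length * (PySem.List.pyGetD matrix 0 []).length := by
      rw [← Nat.cast_mul]; exact Int.toNat_natCast _
    rw [hfuel, (pvLoopA_cols matrix matrix.length hpos (PySem.List.pyGetD matrix 0 []).length).1 [],
      pvFoldB matrix matrix.length (PySem.List.pyGetD matrix 0 []).length true []]
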